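-- pv_equiv track=rewrite | github.com/yushan777/ComfyUI-Y7Nodes | Y7Nodes.py | format_token_pairs
-- ===== SOURCE A (Python) =====
-- def format_token_pairs(formatted_pairs, longest_word_length, token_word_pairs_per_line):
--     num_of_token_pairs_per_line = token_word_pairs_per_line
--     formatted_string = ""
--     counter = 0  # Counter to track the number of token pairs in the current line
--
--     for pair in formatted_pairs:
--         token_id, word = pair.split(": ")  # Split the token and the word
--         padding = longest_word_length - len(word)  # Calculate the padding needed to align the word
--
--         # Check if the token ID is either 49406 or 49407, which should be on their own lines
--         if token_id == "49406" or token_id == "49407":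
--             if counter != 0:  # If there are existing tokens on the current line, add a newline before
--                 formatted_string += "\n"
--                 counter = 0  # Reset the counter
--             formatted_string += f"{token_id}: {word}\n"  # Add to its own line
--         else:
--             # Add the token and word with padding and additional 3 spaces
--             formatted_string += f"{token_id}: {word}{' ' * padding}   "
--             counter += 1  # Increment the counter
--
--             # If there are {num_of_token_pairs_per_line} token pairs in the line, add a newline and reset the counter
--             if counter >= num_of_token_pairs_per_line:
--                 formatted_string += "\n"
--                 counter = 0
--
--     # Ensure the formatted string ends with a newline
--     if not formatted_string.endswith("\n"):
--         formatted_string += "\n"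
--
--     return formatted_string
-- ===== SOURCE B (Python) =====
-- def format_token_pairs(formatted_pairs, longest_word_length, token_word_pairs_per_line):
--     n = max(token_word_pairs_per_line, 1)
--
--     def fmt(t, w):
--         return f"{t}: {w}{' ' * max(longest_word_length - len(w), 0)}   "
--
--     parsed = [tuple(p.split(": ")) for p in formatted_pairs]
--
--     # Build the list of output rows group-at-a-time: a special token is its own
--     # row; otherwise a row is the slice of up to n regular entries starting at i
--     # (stopping early at a special token or the end of the list).
--     rows = []
--     i = 0
--     while i < len(parsed):
--         t, w = parsed[i]
--         if t in ("49406", "49407"):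
--             rows.append(f"{t}: {w}")
--             i += 1
--         else:
--             j = i + 1
--             while j < len(parsed) and j - i < n and parsed[j][0] not in ("49406", "49407"):
--                 j += 1
--             rows.append("".join(fmt(t, w) for t, w in parsed[i:j]))
--             i = j
--
--     result = "".join(row + "\n" for row in rows)
--     if not result.endswith("\n"):
--         result += "\n"
--     return result
-- ===== Notes on version B (the rewrite author's own statement) =====
-- stated objective: alternative
-- what changed: B has no cross-iteration counter/accumulator state: it first parses all pairs, then an outer loop jumps group-at-a-time by index arithmetic (an inner scan finds the end j of each row: up to n regulars stopping at a special or the end), each row is a slice parsed[i:j] formatted and joined, and the rows are joined with newlines at the end; Pre_ excludes pairs whose split on ': ' does not give exactly two parts, where A raises ValueError.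
import Mathlib
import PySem

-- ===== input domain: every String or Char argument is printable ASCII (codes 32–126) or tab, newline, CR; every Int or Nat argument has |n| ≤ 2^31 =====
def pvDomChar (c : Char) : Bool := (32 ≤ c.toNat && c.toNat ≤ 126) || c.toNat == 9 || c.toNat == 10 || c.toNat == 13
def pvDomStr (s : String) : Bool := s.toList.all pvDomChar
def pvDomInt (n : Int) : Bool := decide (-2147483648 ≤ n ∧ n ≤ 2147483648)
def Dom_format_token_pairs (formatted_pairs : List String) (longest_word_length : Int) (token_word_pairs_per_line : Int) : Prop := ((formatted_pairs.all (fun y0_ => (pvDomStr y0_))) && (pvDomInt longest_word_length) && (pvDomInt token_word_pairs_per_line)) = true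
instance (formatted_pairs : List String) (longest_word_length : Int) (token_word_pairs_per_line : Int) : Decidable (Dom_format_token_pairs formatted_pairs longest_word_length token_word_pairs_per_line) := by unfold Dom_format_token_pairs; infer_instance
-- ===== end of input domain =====

-- B replaces A's single stateful pass (running string + line counter) by a staged pipeline:
-- parse all pairs first, then build the list of output rows group-at-a-time by index jumps
-- (each row a slice parsed[i:j]), then join the rows; same output, no speed claim.

-- ===== PORT A =====
-- loop body of A, one step of the fold over formatted_pairs; state = (formatted_string, counter)
def stepA (longest_word_length num_per_line : Int) (st : String × Int) (pair : String) : String × Int :=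
  match PySem.Str.split? pair ": " with
  | some [token_id, word] =>
    let padding := longest_word_length - (PySem.Str.len word : Int)
    if token_id == "49406" || token_id == "49407" then
      let st1 := if st.2 ≠ 0 then (st.1 ++ "\n", (0 : Int)) else st
      (st1.1 ++ token_id ++ ": " ++ word ++ "\n", st1.2)
    else
      let acc := st.1 ++ token_id ++ ": " ++ word ++ String.ofList (PySem.List.pyRepeat [' '] padding) ++ "   "
      let counter := st.2 + 1
      if counter ≥ num_per_line then (acc ++ "\n", (0 : Int)) else (acc, counter)
  | _ => st   -- unreachable under Pre_ (Python raises ValueError on the unpacking)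

def format_token_pairs (formatted_pairs : List String) (longest_word_length : Int) (token_word_pairs_per_line : Int) : String :=
  let st := formatted_pairs.foldl (stepA longest_word_length token_word_pairs_per_line) ("", 0)
  if PySem.Str.endswith st.1 "\n" then st.1 else st.1 ++ "\n"

-- ===== PORT B =====
-- tuple(p.split(": ")) of Source B
def parseB (p : String) : List String := (PySem.Str.split? p ": ").getD []

-- the test  e[0] in ("49406", "49407")  of Source B (split always yields a nonempty list)
def isSpecB (e : List String) : Bool := (e.getD 0 "" == "49406") || (e.getD 0 "" == "49407")

-- fmt of Source B
def fmtB (longest_word_length : Int) (t w : String) : String :=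
  t ++ ": " ++ w ++ String.ofList (PySem.List.pyRepeat [' '] (max (longest_word_length - (PySem.Str.len w : Int)) 0)) ++ "   "

-- fmt applied to one unpacked entry ('for t, w in parsed[i:j]'); a malformed entry is
-- unreachable under Pre_ (Python raises on the unpacking there)
def fmtEntB (longest_word_length : Int) (e : List String) : String :=
  match e with
  | [t, w] => fmtB longest_word_length t w
  | _ => ""

-- inner while of Source B: advance j while j < len(parsed) and j - i < n and parsed[j] not special
def rowEndB (n : Int) (parsed : List (List String)) (i j : Nat) : Nat :=
  if h : j < parsed.length then
    if ((j : Int) - (i : Int) < n) ∧ isSpecB (parsed.getD j []) = false then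
      rowEndB n parsed i (j + 1)
    else j
  else j
termination_by parsed.length - j

-- termination of the outer loop: the inner while never moves j backwards
lemma rowEndB_ge_aux (n : Int) (parsed : List (List String)) (i : Nat) :
    ∀ (m j : Nat), parsed.length - j ≤ m → j ≤ rowEndB n parsed i j := by
  intro m
  induction m with
  | zero =>
    intro j hm
    rw [rowEndB]
    split
    · omega
    · omega
  | succ m ih =>
    intro j hm
    rw [rowEndB]
    split
    · split
      · exact le_trans (Nat.le_succ j) (ih (j + 1) (by omega))
      · exact le_refl j
    · exact le_refl j

lemma rowEndB_ge (n : Int) (parsed : List (List String)) (i j : Nat) :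
    j ≤ rowEndB n parsed i j :=
  rowEndB_ge_aux n parsed i parsed.length j (by omega)

-- outer while of Source B: build the list of output rows, jumping a whole row at a time
def rowsB (longest_word_length n : Int) (parsed : List (List String)) (i : Nat) : List String :=
  if h : i < parsed.length then
    if (parsed.getD i []).length = 2 then      -- the unpacking t, w = parsed[i]; a malformed
      let t := (parsed.getD i []).getD 0 ""    -- entry is unreachable under Pre_ (Python raises)
      let w := (parsed.getD i []).getD 1 ""
      if t == "49406" || t == "49407" then
        (t ++ ": " ++ w) :: rowsB longest_word_length n parsed (i + 1)
      else
        let j := rowEndB n parsed i (i + 1)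
        (PySem.Str.join "" ((PySem.List.slice parsed (some (i : Int)) (some (j : Int))).map (fmtEntB longest_word_length)))
          :: rowsB longest_word_length n parsed j
    else []
  else []
termination_by parsed.length - i
decreasing_by
  · omega
  · have := rowEndB_ge n parsed i (i + 1); omega

def format_token_pairs_alt (formatted_pairs : List String) (longest_word_length : Int) (token_word_pairs_per_line : Int) : String :=
  let n := max token_word_pairs_per_line 1
  let parsed := formatted_pairs.map parseB
  let rows := rowsB longest_word_length n parsed 0
  let result := PySem.Str.join "" (rows.map (· ++ "\n"))
  if PySem.Str.endswith result "\n" then result else result ++ "\n"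

-- ===== PRECONDITION & SPEC =====
-- Pre_ excludes inputs on which some pair does not split on ": " into exactly two parts:
-- there Python A raises ValueError (the 2-tuple unpacking of pair.split(": ") fails).
def Pre_format_token_pairs (formatted_pairs : List String) (longest_word_length : Int) (token_word_pairs_per_line : Int) : Prop :=
  ∀ pair ∈ formatted_pairs, ((PySem.Str.split? pair ": ").getD []).length = 2
instance (formatted_pairs : List String) (longest_word_length : Int) (token_word_pairs_per_line : Int) : Decidable (Pre_format_token_pairs formatted_pairs longest_word_length token_word_pairs_per_line) := by unfold Pre_format_token_pairs; infer_instance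

def pvWitness_format_token_pairs : List String × Int × Int := (["49406: s", "12: ab", "7: c", "49407: e"], 4, 2)

def Spec_format_token_pairs (formatted_pairs : List String) (longest_word_length : Int) (token_word_pairs_per_line : Int) (out : String) : Prop := out = format_token_pairs_alt formatted_pairs longest_word_length token_word_pairs_per_line
instance (formatted_pairs : List String) (longest_word_length : Int) (token_word_pairs_per_line : Int) (out : String) : Decidable (Spec_format_token_pairs formatted_pairs longest_word_length token_word_pairs_per_line out) := by unfold Spec_format_token_pairs; infer_instance

-- ===== CLAIM (what is proved, stated in full; the proofs are below) =====
def Claim_equal_format_token_pairs : Prop := ∀ (formatted_pairs : List String) (longest_word_length : Int) (token_word_pairs_per_line : Int), Dom_format_token_pairs formatted_pairs longest_word_length token_word_pairs_per_line → Pre_format_token_pairs formatted_pairs longest_word_length token_word_pairs_per_line → Spec_format_token_pairs formatted_pairs longest_word_length token_word_pairs_per_line (format_token_pairs formatted_pairs longest_word_length token_word_pairs_per_line)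

-- ===== LEMMAS AND PROOFS =====

-- "".join at the List Char level is plain concatenation
lemma join_empty_toList (xs : List String) :
    (PySem.Str.join "" xs).toList = (xs.map String.toList).flatten := by
  rw [PySem.Str.toList_join]
  have h : ∀ ys : List (List Char), PySem.Chars.join [] ys = ys.flatten := by
    intro ys
    induction ys with
    | nil => exact PySem.Chars.join_nil _
    | cons a t ih =>
      cases t with
      | nil => simp [PySem.Chars.join_singleton]
      | cons b u => rw [PySem.Chars.join_cons_cons]; simp_all
  simp [h]

-- A's entry text equals B's entry text (negative padding is empty either way)
lemma entry_eq (L : Int) (t w : String) :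
    t ++ ": " ++ w ++ String.ofList (PySem.List.pyRepeat [' '] (L - (PySem.Str.len w : Int))) ++ "   "
      = fmtB L t w := by
  have h : (L - (PySem.Str.len w : Int)).toNat = (max (L - (PySem.Str.len w : Int)) 0).toNat := by
    omega
  simp only [fmtB, PySem.List.pyRepeat_singleton, h]

lemma fmtEntB_pair (L : Int) (t w : String) : fmtEntB L [t, w] = fmtB L t w := rfl

lemma endswith_nl (s : String) : PySem.Str.endswith s "\n" = true ↔ s.toList.getLast? = some '\n' := by
  have hb : PySem.Str.endswith s "\n" = PySem.Chars.endswith s.toList ['\n'] := by simp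
  rw [hb, PySem.Chars.endswith_iff]
  constructor
  · rintro ⟨t, ht⟩; rw [← ht]; simp
  · intro h
    rw [List.getLast?_eq_some_iff] at h
    obtain ⟨t, ht⟩ := h
    exact ⟨t, ht.symm⟩

-- fold invariant: a nonzero counter means the string ends in a space (a partial line)
lemma lastsp (L k : Int) : ∀ (l : List String) (acc : String) (c : Int),
    (c ≠ 0 → acc.toList.getLast? = some ' ') →
    (l.foldl (stepA L k) (acc, c)).2 ≠ 0 →
    (l.foldl (stepA L k) (acc, c)).1.toList.getLast? = some ' ' := by
  intro l
  induction l with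
  | nil => intro acc c h hc; exact h hc
  | cons p tl ih =>
    intro acc c h
    simp only [List.foldl_cons]
    have hstep : (stepA L k (acc, c) p).2 ≠ 0 →
        (stepA L k (acc, c) p).1.toList.getLast? = some ' ' := by
      rcases hs : PySem.Str.split? p ": " with _ | ⟨_ | ⟨t, _ | ⟨w, _ | _⟩⟩⟩ <;>
        simp only [stepA, hs] <;> try exact h
      by_cases hspec : (t == "49406" || t == "49407") = true
      · rw [if_pos hspec]
        intro hc
        exfalso
        by_cases hcc : c ≠ 0 <;> simp [hcc] at hc
      · rw [if_neg hspec]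
        by_cases hf : c + 1 ≥ k
        · rw [if_pos hf]; intro hc; simp at hc
        · rw [if_neg hf]; intro _
          dsimp only
          rw [String.toList_append,
            List.getLast?_append_of_ne_nil _ (by decide : "   ".toList ≠ [])]
          decide
    exact ih _ _ hstep

-- a pair that splits into a regular (non-special) id/word
def IsReg (p : String) : Prop :=
  ∃ t w, PySem.Str.split? p ": " = some [t, w] ∧ (t == "49406" || t == "49407") = false

-- the characters a run of regular pairs contributes
def runChars (L : Int) (l : List String) : List Char :=
  (l.map (fun p => (fmtEntB L (parseB p)).toList)).flatten

-- max k 1 facts packaged for omega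
lemma maxK_cases (k : Int) : (max k 1 = k ∨ max k 1 = 1) ∧ k ≤ max k 1 ∧ 1 ≤ max k 1 :=
  ⟨max_choice k 1, le_max_left k 1, le_max_right k 1⟩

-- A's fold over a run of at most (max k 1) regular pairs: appends the formatted entries,
-- plus a newline exactly when the line fills up
lemma runA (L k : Int) : ∀ (l : List String) (acc : String) (c : Int),
    (∀ p ∈ l, IsReg p) → 0 ≤ c → c + l.length ≤ max k 1 → c < max k 1 → (k ≤ 0 → c = 0) →
    (l.foldl (stepA L k) (acc, c)).1.toList
        = acc.toList ++ runChars L l ++ (if c + l.length = max k 1 then ['\n'] else [])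
      ∧ (l.foldl (stepA L k) (acc, c)).2 = (if c + l.length = max k 1 then 0 else c + l.length) := by
  intro l
  induction l with
  | nil =>
    intro acc c hreg hc0 hlen hclt hk0
    have hne : ¬ (c + (([] : List String).length : Int) = max k 1) := by
      simp only [List.length_nil, Nat.cast_zero, add_zero]; omega
    rw [if_neg hne, if_neg hne]
    simp [runChars]
  | cons p tl ih =>
    intro acc c hreg hc0 hlen hclt hk0
    obtain ⟨hM, hMk, hM1⟩ := maxK_cases k
    obtain ⟨t, w, hsp, hspec⟩ := hreg p List.mem_cons_self
    have hlen' : c + (1 + (tl.length : Int)) ≤ max k 1 := by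
      simpa [add_comm] using hlen
    simp only [List.foldl_cons, stepA, hsp, hspec, Bool.false_eq_true, if_false]
    by_cases hf : c + 1 = max k 1
    · -- the line fills with this entry: flush, and the run must end here
      have htl : tl = [] := by
        have : (tl.length : Int) = 0 := by omega
        exact List.length_eq_zero_iff.mp (by exact_mod_cast this)
      subst htl
      have hge : c + 1 ≥ k := by omega
      rw [if_pos hge]
      have hcond : c + ((([p] : List String).length : Int)) = max k 1 := by
        simpa using hf
      rw [if_pos hcond, if_pos hcond]
      refine ⟨?_, rfl⟩
      simp only [List.foldl_nil, runChars, List.map_cons, List.map_nil, List.flatten, parseB, hsp, Option.getD_some, fmtEntB_pair]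
      rw [← entry_eq]
      simp [String.toList_append]
    · -- no flush: counter goes to c+1 and the fold continues
      have hnge : ¬ (c + 1 ≥ k) := by
        rcases (by omega : k ≤ 0 ∨ 0 < k) with hk | hk
        · exact absurd hf (by have := hk0 hk; omega)
        · omega
      rw [if_neg hnge]
      have hk0' : k ≤ 0 → c + 1 = 0 := by
        intro hk; exact absurd hf (by have := hk0 hk; omega)
      obtain ⟨ih1, ih2⟩ := ih _ (c + 1)
        (fun q hq => hreg q (List.mem_cons_of_mem _ hq)) (by omega) (by omega)
        (by omega) hk0'
      have hcond : (c + 1 + (tl.length : Int) = max k 1)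
          ↔ (c + (((p :: tl).length : Int)) = max k 1) := by
        simp only [List.length_cons]; push_cast; constructor <;> intro <;> omega
      constructor
      · rw [ih1]
        have hacc : (acc ++ t ++ ": " ++ w ++
            String.ofList (PySem.List.pyRepeat [' '] (L - (PySem.Str.len w : Int))) ++ "   ").toList
            = acc.toList ++ (fmtEntB L (parseB p)).toList := by
          have h1 : t ++ ": " ++ w ++
              String.ofList (PySem.List.pyRepeat [' '] (L - (PySem.Str.len w : Int))) ++ "   "
              = fmtB L t w := entry_eq L t w
          simp only [parseB, hsp, Option.getD_some, fmtEntB_pair, ← h1]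
          simp [String.toList_append]
        rw [hacc]
        by_cases hc2 : c + 1 + (tl.length : Int) = max k 1
        · rw [if_pos hc2, if_pos (hcond.mp hc2)]
          simp [runChars]
        · rw [if_neg hc2, if_neg (fun hh => hc2 (hcond.mpr hh))]
          simp [runChars]
      · rw [ih2]
        by_cases hc2 : c + 1 + (tl.length : Int) = max k 1
        · rw [if_pos hc2, if_pos (hcond.mp hc2)]
        · rw [if_neg hc2, if_neg (fun hh => hc2 (hcond.mpr hh))]
          simp only [List.length_cons]; push_cast; omega

-- the rendered rows, as characters
def renderRows (rows : List String) : List Char :=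
  ((rows.map (· ++ "\n")).map String.toList).flatten

lemma renderRows_nil : renderRows [] = [] := rfl

lemma renderRows_cons (r : String) (rs : List String) :
    renderRows (r :: rs) = r.toList ++ '\n' :: renderRows rs := by
  simp [renderRows, String.toList_append]

-- what the inner while loop of Source B computes
lemma rowEnd_spec (n : Int) (parsed : List (List String)) (i : Nat) :
    ∀ (m j : Nat), parsed.length - j ≤ m → j ≤ parsed.length → ((j : Int) - (i : Int) ≤ n) →
    j ≤ rowEndB n parsed i j ∧ rowEndB n parsed i j ≤ parsed.length ∧
    ((rowEndB n parsed i j : Int) - (i : Int) ≤ n) ∧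
    (∀ m', j ≤ m' → m' < rowEndB n parsed i j → isSpecB (parsed.getD m' []) = false) ∧
    (rowEndB n parsed i j = parsed.length ∨ ((rowEndB n parsed i j : Int) - (i : Int) = n) ∨
      isSpecB (parsed.getD (rowEndB n parsed i j) []) = true) := by
  intro m
  induction m with
  | zero =>
    intro j hm hj hn
    rw [rowEndB, dif_neg (by omega : ¬ j < parsed.length)]
    exact ⟨le_refl j, hj, hn, fun _ h1 h2 => by omega,
      Or.inl (by omega)⟩
  | succ m ih =>
    intro j hm hj hn
    by_cases hlt : j < parsed.length
    · rw [rowEndB, dif_pos hlt]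
      by_cases hcond : ((j : Int) - (i : Int) < n) ∧ isSpecB (parsed.getD j []) = false
      · rw [if_pos hcond]
        obtain ⟨g1, g2, g3, g4, g5⟩ := ih (j + 1) (by omega) (by omega) (by push_cast; omega)
        refine ⟨by omega, g2, g3, ?_, g5⟩
        intro m' h1 h2
        rcases Nat.eq_or_lt_of_le h1 with rfl | h1'
        · exact hcond.2
        · exact g4 m' h1' h2
      · rw [if_neg hcond]
        refine ⟨le_refl j, hj, hn, fun _ h1 h2 => by omega, ?_⟩
        rcases (not_and_or.mp hcond) with h | h
        · exact Or.inr (Or.inl (by omega))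
        · exact Or.inr (Or.inr (by simpa using h))
    · rw [rowEndB, dif_neg hlt]
      exact ⟨le_refl j, hj, hn, fun _ h1 h2 => by omega,
        Or.inl (by omega)⟩

-- getD through map, at an in-range index
lemma map_getD {α β : Type} (f : α → β) (l : List α) (i : Nat) (d : β) (hi : i < l.length) :
    (l.map f).getD i d = f (l[i]) := by
  simp [List.getD, hi]

-- a pair admitted by Pre_ splits into exactly two parts
lemma pre_split {p : String} (hp : ((PySem.Str.split? p ": ").getD []).length = 2) :
    ∃ t w, PySem.Str.split? p ": " = some [t, w] := by
  rcases hs : PySem.Str.split? p ": " with _ | l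
  · rw [hs] at hp; simp at hp
  · rw [hs] at hp; simp only [Option.getD_some] at hp
    rcases l with _ | ⟨t, _ | ⟨w, _ | ⟨x, r⟩⟩⟩
    · simp at hp
    · simp at hp
    · exact ⟨t, w, rfl⟩
    · simp at hp

-- main simulation: A's fold from a fresh line, closed with a pending newline if the
-- last line is partial, renders exactly B's rows from index i on
lemma mainA (L k : Int) (fps : List String)
    (hpre : ∀ p ∈ fps, ((PySem.Str.split? p ": ").getD []).length = 2) :
    ∀ (m i : Nat) (acc : String), fps.length - i ≤ m →
    (if ((fps.drop i).foldl (stepA L k) (acc, 0)).2 ≠ 0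
      then ((fps.drop i).foldl (stepA L k) (acc, 0)).1 ++ "\n"
      else ((fps.drop i).foldl (stepA L k) (acc, 0)).1).toList
    = acc.toList ++ renderRows (rowsB L (max k 1) (fps.map parseB) i) := by
  have hbase : ∀ (i : Nat) (acc : String), fps.length ≤ i →
      (if ((fps.drop i).foldl (stepA L k) (acc, 0)).2 ≠ 0
        then ((fps.drop i).foldl (stepA L k) (acc, 0)).1 ++ "\n"
        else ((fps.drop i).foldl (stepA L k) (acc, 0)).1).toList
      = acc.toList ++ renderRows (rowsB L (max k 1) (fps.map parseB) i) := by
    intro i acc hle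
    rw [List.drop_eq_nil_of_le hle, rowsB, dif_neg (by simpa using not_lt.mpr hle)]
    simp [renderRows_nil]
  intro m
  induction m with
  | zero => intro i acc hm; exact hbase i acc (by omega)
  | succ m ih =>
    intro i acc hm
    by_cases hi : i < fps.length
    swap
    · exact hbase i acc (by omega)
    have hpar : (fps.map parseB).getD i [] = parseB fps[i] := map_getD parseB fps i [] hi
    obtain ⟨ti, wi, hsp⟩ := pre_split (hpre fps[i] (List.getElem_mem hi))
    have hparv : (fps.map parseB).getD i [] = [ti, wi] := by
      rw [hpar]; simp [parseB, hsp]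
    have hdrop : fps.drop i = fps[i] :: fps.drop (i + 1) := List.drop_eq_getElem_cons hi
    rw [rowsB, dif_pos (by simpa using hi), hparv]
    simp only [List.length_cons, List.length_nil, List.getD_cons_zero, List.getD_cons_succ]
    rw [if_pos trivial]
    by_cases hspec : (ti == "49406" || ti == "49407") = true
    · -- special token: its own row
      rw [if_pos hspec, hdrop]
      simp only [List.foldl_cons, stepA, hsp, hspec, if_true]
      rw [if_neg (show ¬((0 : Int) ≠ 0) by simp)]
      dsimp only
      have hI := ih (i + 1) (acc ++ ti ++ ": " ++ wi ++ "\n") (by omega)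
      rw [hI, renderRows_cons]
      simp [String.toList_append, List.append_assoc]
    · -- regular token: one whole row [i, j)
      rw [if_neg hspec]
      have hppl : (fps.map parseB).length = fps.length := by simp
      obtain ⟨g1, g2, g3, g4, g5⟩ := rowEnd_spec (max k 1) (fps.map parseB) i
        (fps.map parseB).length (i + 1) (by omega) (by simp only [hppl]; omega)
        (by push_cast; have := (maxK_cases k).2.2; omega)
      set j := rowEndB (max k 1) (fps.map parseB) i (i + 1) with hj
      rw [hppl] at g2
      have hjlen : j ≤ fps.length := g2
      have hij : i + 1 ≤ j := g1
      set group := (fps.drop i).take (j - i) with hgroup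
      have hglen : group.length = j - i := by
        simp only [hgroup, List.length_take, List.length_drop]; omega
      have hsplitlist : fps.drop i = group ++ fps.drop j := by
        have h2 : (fps.drop i).drop (j - i) = fps.drop j := by
          rw [List.drop_drop]; congr 1; omega
        rw [hgroup, ← h2, List.take_append_drop]
      have hgroupreg : ∀ p ∈ group, IsReg p := by
        intro p hp
        rw [List.mem_iff_getElem] at hp
        obtain ⟨idx, hidx, rfl⟩ := hp
        have hidx' : idx < j - i := by
          rw [hglen] at hidx; exact hidx
        have hmlt : i + idx < fps.length := by omega
        have hget : group[idx] = fps[i + idx]'hmlt := by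
          simp [hgroup, List.getElem_take, List.getElem_drop]
        obtain ⟨t', w', hsp'⟩ := pre_split (hpre (fps[i + idx]'hmlt) (List.getElem_mem hmlt))
        rcases Nat.eq_zero_or_pos idx with rfl | hpos
        · refine ⟨t', w', by rw [hget]; simpa using hsp', ?_⟩
          have : fps[i + 0]'hmlt = fps[i] := by simp
          rw [this] at hsp'
          rw [hsp] at hsp'
          obtain ⟨rfl, rfl⟩ : ti = t' ∧ wi = w' := by
            simpa using hsp'
          exact Bool.not_eq_true _ ▸ (by simpa using hspec)
        · have hspecF := g4 (i + idx) (by omega) (by omega)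
          rw [map_getD parseB fps (i + idx) [] hmlt] at hspecF
          have : parseB (fps[i + idx]'hmlt) = [t', w'] := by simp [parseB, hsp']
          rw [this] at hspecF
          simp only [isSpecB, List.getD_cons_zero] at hspecF
          exact ⟨t', w', by rw [hget]; exact hsp', hspecF⟩
      have hcast : ((j - i : Nat) : Int) = (j : Int) - (i : Int) := by omega
      obtain ⟨r1, r2⟩ := runA L k group acc 0 hgroupreg (le_refl 0)
        (by rw [hglen]; rw [hcast]; omega)
        (by have := (maxK_cases k).2.2; omega) (fun _ => rfl)
      have hslice : PySem.List.slice (fps.map parseB) (some (i : Int)) (some (j : Int))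
          = group.map parseB := by
        rw [PySem.List.slice_natCast, hgroup]
        simp [List.map_take, List.map_drop]
      have hrow : (PySem.Str.join ""
            ((PySem.List.slice (fps.map parseB) (some (i : Int)) (some (j : Int))).map (fmtEntB L))).toList
          = runChars L group := by
        rw [hslice, join_empty_toList]
        simp [runChars, List.map_map, Function.comp_def]
      rw [hsplitlist, List.foldl_append]
      set stp := group.foldl (stepA L k) (acc, (0 : Int)) with hstp
      rw [show stp = (stp.1, stp.2) from rfl]
      by_cases hfl : (0 : Int) + (group.length : Int) = max k 1
      · -- the row is a full line: A flushed it with a newline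
        rw [if_pos hfl] at r1 r2
        rw [r2]
        have hI := ih j stp.1 (by omega)
        rw [hI, r1, renderRows_cons]
        simp [hrow, List.append_assoc]
      · rw [if_neg hfl] at r1 r2
        have hc2 : stp.2 ≠ 0 := by
          rw [r2, hglen]; simp; omega
        have hnotmid : ¬ ((j : Int) - (i : Int) = max k 1) := by
          rw [hglen] at hfl; omega
        rcases g5 with hjend | hmid | hspecj
        · -- the run reaches the end of the input: A's final partial line
          rw [hppl] at hjend
          have hjlen' : fps.length ≤ j := by omega
          rw [List.drop_eq_nil_of_le hjlen']
          simp only [List.foldl_nil]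
          rw [if_pos hc2]
          rw [rowsB, dif_neg (by omega), renderRows_cons, renderRows_nil, hrow]
          simp only [String.toList_append, r1]
          simp
        · exact absurd hmid hnotmid
        · -- the run stops at a special token: A flushes, then the special row
          have hjlt : j < fps.length := by
            by_contra hge
            rw [List.getD_eq_default _ _ (by simpa using not_lt.mp hge)] at hspecj
            simp [isSpecB] at hspecj
          obtain ⟨t', w', hsp'⟩ := pre_split (hpre fps[j] (List.getElem_mem hjlt))
          have hparj : (fps.map parseB).getD j [] = [t', w'] := by
            rw [map_getD parseB fps j [] hjlt]; simp [parseB, hsp']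
          rw [hparj] at hspecj
          simp only [isSpecB, List.getD_cons_zero] at hspecj
          have hdropj : fps.drop j = fps[j] :: fps.drop (j + 1) := List.drop_eq_getElem_cons hjlt
          rw [hdropj]
          simp only [List.foldl_cons, stepA, hsp', hspecj, if_true]
          rw [if_pos hc2]
          simp only []
          have hrowsj : rowsB L (max k 1) (fps.map parseB) j
              = (t' ++ ": " ++ w') :: rowsB L (max k 1) (fps.map parseB) (j + 1) := by
            rw [rowsB, dif_pos (by simpa using hjlt), hparj]
            simp only [List.length_cons, List.length_nil, List.getD_cons_zero, List.getD_cons_succ]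
            rw [if_pos trivial, if_pos hspecj]
          have hI := ih (j + 1) ((stp.1 ++ "\n") ++ t' ++ ": " ++ w' ++ "\n") (by omega)
          rw [hI, hrowsj, renderRows_cons, renderRows_cons, hrow]
          simp only [String.toList_append, r1]
          simp [List.append_assoc]

theorem format_token_pairs_spec : Claim_equal_format_token_pairs := by
  intro fps L k _ hpre
  unfold Spec_format_token_pairs format_token_pairs format_token_pairs_alt
  dsimp only
  have hmain := mainA L k fps hpre fps.length 0 "" (by omega)
  rw [List.drop_zero] at hmain
  simp only [String.toList_empty, List.nil_append] at hmain
  set st := fps.foldl (stepA L k) ("", 0) with hst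
  set rows := rowsB L (max k 1) (fps.map parseB) 0 with hrows
  have hres : (PySem.Str.join "" (rows.map (· ++ "\n"))).toList = renderRows rows := by
    rw [join_empty_toList]; rfl
  by_cases hc : st.2 = 0
  · rw [if_neg (by simp [hc])] at hmain
    have h1 : st.1 = PySem.Str.join "" (rows.map (· ++ "\n")) := by
      apply String.toList_inj.mp
      rw [hres, hmain]
    rw [h1]
  · rw [if_pos hc] at hmain
    have hsp : st.1.toList.getLast? = some ' ' := by
      rw [hst]
      exact lastsp L k fps "" 0 (fun h => absurd rfl h) (by rw [← hst]; exact hc)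
    have hendA : PySem.Str.endswith st.1 "\n" = false := by
      rcases hb : PySem.Str.endswith st.1 "\n" with _ | _
      · rfl
      · exfalso
        have := (endswith_nl st.1).mp hb
        rw [hsp] at this
        simp at this
    have hendB : PySem.Str.endswith (PySem.Str.join "" (rows.map (· ++ "\n"))) "\n" = true := by
      rw [endswith_nl, hres, ← hmain, String.toList_append]
      rw [List.getLast?_append_of_ne_nil _ (by decide : "\n".toList ≠ [])]
      decide
    rw [hendA, hendB]
    simp only [Bool.false_eq_true, if_false, if_true]
    apply String.toList_inj.mp
    rw [hres, ← hmain]
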